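-- pv_equiv track=rewrite | github.com/DfX-NYUAD/OptiLock | src/OptiLock_SCOPE_Searching.py | split_dictionary_v2
-- ===== SOURCE A (Python) =====
-- def split_dictionary(data, num_parts):
--     # Calculate the number of items each part should have
--     total_items = len(data)
--     items_per_part = total_items // num_parts
--     remainder = total_items % num_parts
--
--     # Create a list to store the smaller dictionaries
--     split_dicts = [{} for _ in range(num_parts)]
--
--     # Initialize an index for tracking which part to add to
--     part_index = 0
--     item_count = 0
--
--     # Iterate over the original dictionary and distribute the items
--     for idx, (key, value) in enumerate(data.items()):
--         # Add the key-value pair to the appropriate smaller dictionary with reset key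
--         split_dicts[part_index][item_count] = value
--         item_count += 1
--
--         # Move to the next dictionary if the current one is full
--         if item_count == items_per_part + (1 if part_index < remainder else 0):
--             part_index += 1
--             item_count = 0
--
--     return split_dicts
--
-- def split_dictionary_v2(dict_list, key_size):
--     split_dicts = []
--     for dict_temp in dict_list:
--         if len(dict_temp) > 10000:
--             split_dict = split_dictionary(dict_temp, len(dict_temp)//(key_size*5))
--             split_dicts += split_dict
--         else:
--             split_dicts.append(dict_temp)
--     return split_dicts
-- ===== SOURCE B (Python) =====
-- def _split_into_chunks(data, num_parts):
--     total = len(data)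
--     q, r = divmod(total, num_parts)
--     # size table computed up front, then the item list is sliced into consecutive chunks
--     sizes = [q + (1 if i < r else 0) for i in range(num_parts)]
--     items = list(data.items())
--     out = []
--     pos = 0
--     for s in sizes:
--         chunk = items[pos:pos + s]
--         out.append({j: value for j, (_key, value) in enumerate(chunk)})
--         pos += s
--     return out
--
-- def split_dictionary_v2(dict_list, key_size):
--     split_dicts = []
--     for dict_temp in dict_list:
--         if len(dict_temp) > 10000:
--             split_dicts += _split_into_chunks(dict_temp, len(dict_temp) // (key_size * 5))
--         else:
--             split_dicts.append(dict_temp)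
--     return split_dicts
-- ===== Notes on version B (the rewrite author's own statement) =====
-- stated objective: alternative
-- what changed: The inner split no longer simulates Python's per-item counter loop with mutable part_index/item_count state; it precomputes each bucket's size table, then slices the materialised item list into consecutive chunks and reindexes each chunk with enumerate.
import Mathlib
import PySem

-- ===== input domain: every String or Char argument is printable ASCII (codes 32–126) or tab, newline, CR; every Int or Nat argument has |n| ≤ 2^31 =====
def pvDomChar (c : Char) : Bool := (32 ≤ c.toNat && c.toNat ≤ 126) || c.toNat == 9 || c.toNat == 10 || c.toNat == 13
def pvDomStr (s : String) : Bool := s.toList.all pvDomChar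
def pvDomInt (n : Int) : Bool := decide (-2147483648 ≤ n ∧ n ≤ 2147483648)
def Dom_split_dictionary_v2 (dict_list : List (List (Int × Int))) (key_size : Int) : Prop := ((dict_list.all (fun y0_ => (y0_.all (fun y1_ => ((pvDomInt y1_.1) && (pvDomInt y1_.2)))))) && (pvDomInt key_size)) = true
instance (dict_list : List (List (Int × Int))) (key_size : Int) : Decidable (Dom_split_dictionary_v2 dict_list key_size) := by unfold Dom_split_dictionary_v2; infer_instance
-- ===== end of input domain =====

-- B replaces A's per-item counter loop by an up-front bucket-size table plus slicing the
-- item list into consecutive reindexed chunks (objective: alternative decomposition, same cost).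

-- ===== PORT A =====
-- Python dict assignment d[k] = v on an association list: overwrite in place, new key appends
def dictSet (d : List (Int × Int)) (k v : Int) : List (Int × Int) :=
  match d with
  | [] => [(k, v)]
  | (k', v') :: rest => if k' = k then (k, v) :: rest else (k', v') :: dictSet rest k v

-- body of split_dictionary's for-loop; state = (split_dicts, part_index, item_count)
def splitStep (ipp rem : Int)
    (st : List (List (Int × Int)) × Int × Int) (kv : Int × Int) :
    List (List (Int × Int)) × Int × Int :=
  let bs := st.1.modify st.2.1.toNat (fun b => dictSet b st.2.2 kv.2)
  let c := st.2.2 + 1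
  if c = ipp + (if st.2.1 < rem then 1 else 0) then (bs, st.2.1 + 1, 0) else (bs, st.2.1, c)

def split_dictionary (data : List (Int × Int)) (num_parts : Int) : List (List (Int × Int)) :=
  let total : Int := data.length
  let ipp := PySem.Int.floordiv total num_parts
  let rem := PySem.Int.mod total num_parts
  (data.foldl (splitStep ipp rem) (List.replicate num_parts.toNat [], 0, 0)).1

def split_dictionary_v2 (dict_list : List (List (Int × Int))) (key_size : Int) : List (List (Int × Int)) :=
  dict_list.foldl (fun acc d =>
    if (10000 : Int) < (d.length : Int) then
      acc ++ split_dictionary d (PySem.Int.floordiv (d.length : Int) (key_size * 5))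
    else acc ++ [d]) []

-- ===== PORT B =====
-- {j: value for j, (_key, value) in enumerate(chunk)}
def reindexChunk (chunk : List (Int × Int)) : List (Int × Int) :=
  (PySem.List.enumerate chunk).map (fun p => (p.1, p.2.2))

-- body of the for-s-in-sizes loop; state = (out, pos)
def chunkStep (items : List (Int × Int)) (st : List (List (Int × Int)) × Int) (s : Int) :
    List (List (Int × Int)) × Int :=
  (st.1 ++ [reindexChunk (PySem.List.slice items (some st.2) (some (st.2 + s)))], st.2 + s)

def split_into_chunks (data : List (Int × Int)) (num_parts : Int) : List (List (Int × Int)) :=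
  let total : Int := data.length
  let q := PySem.Int.floordiv total num_parts
  let r := PySem.Int.mod total num_parts
  let sizes := (PySem.List.pyRange 0 num_parts 1).map (fun i => q + (if i < r then 1 else 0))
  (sizes.foldl (chunkStep data) ([], 0)).1

def split_dictionary_v2_alt (dict_list : List (List (Int × Int))) (key_size : Int) : List (List (Int × Int)) :=
  dict_list.foldl (fun acc d =>
    if (10000 : Int) < (d.length : Int) then
      acc ++ split_into_chunks d (PySem.Int.floordiv (d.length : Int) (key_size * 5))
    else acc ++ [d]) []

-- ===== PRECONDITION & SPEC =====
-- Pre_ excludes exactly the inputs on which A raises: a dictionary longer than 10000 together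
-- with key_size ≤ 0 (ZeroDivisionError or IndexError) or key_size*5 > len (num_parts = 0,
-- ZeroDivisionError).
def Pre_split_dictionary_v2 (dict_list : List (List (Int × Int))) (key_size : Int) : Prop :=
  ∀ d ∈ dict_list, (10000 : Int) < (d.length : Int) →
    0 < key_size ∧ key_size * 5 ≤ (d.length : Int)
instance (dict_list : List (List (Int × Int))) (key_size : Int) : Decidable (Pre_split_dictionary_v2 dict_list key_size) := by unfold Pre_split_dictionary_v2; infer_instance

def pvWitness_split_dictionary_v2 : (List (List (Int × Int))) × Int := ([[(1, 2), (3, 4)], []], 1)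

def Spec_split_dictionary_v2 (dict_list : List (List (Int × Int))) (key_size : Int) (out : List (List (Int × Int))) : Prop := out = split_dictionary_v2_alt dict_list key_size
instance (dict_list : List (List (Int × Int))) (key_size : Int) (out : List (List (Int × Int))) : Decidable (Spec_split_dictionary_v2 dict_list key_size out) := by unfold Spec_split_dictionary_v2; infer_instance

-- ===== CLAIM (what is proved, stated in full; the proofs are below) =====
def Claim_equal_split_dictionary_v2 : Prop := ∀ (dict_list : List (List (Int × Int))) (key_size : Int), Dom_split_dictionary_v2 dict_list key_size → Pre_split_dictionary_v2 dict_list key_size → Spec_split_dictionary_v2 dict_list key_size (split_dictionary_v2 dict_list key_size)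

-- ===== LEMMAS AND PROOFS =====

-- reference chunking both ports are reduced to
def chunksI : List Int → List (Int × Int) → List (List (Int × Int))
  | [], _ => []
  | s :: rest, items => reindexChunk (items.take s.toNat) :: chunksI rest (items.drop s.toNat)

theorem dictSet_fresh (b : List (Int × Int)) (k v : Int) (h : ∀ p ∈ b, p.1 ≠ k) :
    dictSet b k v = b ++ [(k, v)] := by
  induction b with
  | nil => rfl
  | cons hd tl ih =>
    have hk : hd.1 ≠ k := h hd (by simp)
    cases hd with
    | mk k' v' =>
      simp only [dictSet, if_neg hk, List.cons_append, List.cons.injEq, true_and]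
      exact ih (fun p hp => h p (by simp [hp]))

theorem reindexChunk_key_lt (pre : List (Int × Int)) (p : Int × Int)
    (hp : p ∈ reindexChunk pre) : p.1 < (pre.length : Int) := by
  unfold reindexChunk at hp
  rcases List.mem_map.1 hp with ⟨q, hq, rfl⟩
  rcases (PySem.List.mem_enumerate_iff _ _ _).1 hq with ⟨k, hk, rfl⟩
  simpa using (by exact_mod_cast hk : ((k : Int)) < (pre.length : Int))

theorem reindexChunk_snoc (pre : List (Int × Int)) (x : Int × Int) :
    reindexChunk (pre ++ [x]) = reindexChunk pre ++ [((pre.length : Int), x.2)] := by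
  unfold reindexChunk
  rw [PySem.List.enumerate_append]
  simp

theorem modify_at (done : List (List (Int × Int))) (cur : List (Int × Int))
    (rest : List (List (Int × Int))) (f : List (Int × Int) → List (Int × Int)) :
    (done ++ cur :: rest).modify done.length f = done ++ f cur :: rest := by
  induction done with
  | nil => simp [List.modify]
  | cons hd tl ih =>
    rw [List.cons_append, List.modify_cons]
    simp [ih]

theorem fill_one (ipp rem : Int) :
    ∀ (chunk pre : List (Int × Int)) (done rest : List (List (Int × Int))),
      chunk ≠ [] →
      ((pre.length : Int) + (chunk.length : Int) = ipp + (if ((done.length : Int)) < rem then 1 else 0)) →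
      chunk.foldl (splitStep ipp rem) (done ++ reindexChunk pre :: rest, (done.length : Int), (pre.length : Int))
        = (done ++ reindexChunk (pre ++ chunk) :: rest, (done.length : Int) + 1, 0) := by
  intro chunk
  induction chunk with
  | nil => intro pre done rest hne _; exact absurd rfl hne
  | cons x tl ih =>
    intro pre done rest _ hsz
    rw [List.foldl_cons]
    have hbs : (done ++ reindexChunk pre :: rest).modify ((done.length : Int)).toNat
        (fun b => dictSet b (pre.length : Int) x.2) = done ++ reindexChunk (pre ++ [x]) :: rest := by
      rw [Int.toNat_natCast, modify_at, dictSet_fresh _ _ _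
        (fun p hp => ne_of_lt (reindexChunk_key_lt pre p hp)), reindexChunk_snoc]
    by_cases htl : tl = []
    · subst htl
      have hcond : (pre.length : Int) + 1 = ipp + (if ((done.length : Int)) < rem then 1 else 0) := by
        simp at hsz; omega
      simp only [splitStep, hbs, if_pos hcond, List.foldl_nil]
    · have htl1 : 1 ≤ tl.length := List.length_pos_iff.mpr htl
      have hcond : ¬ ((pre.length : Int) + 1 = ipp + (if ((done.length : Int)) < rem then 1 else 0)) := by
        simp only [List.length_cons] at hsz; push_cast at hsz ⊢; omega
      simp only [splitStep, hbs, if_neg hcond]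
      have hlen : (pre.length : Int) + 1 = (((pre ++ [x]).length : Nat) : Int) := by
        simp
      rw [hlen, ih (pre ++ [x]) done rest htl (by simp at hsz ⊢; omega)]
      simp

theorem reindexChunk_nil : reindexChunk [] = [] := by
  simp [reindexChunk, PySem.List.enumerate_nil]

theorem loop_chunks (ipp rem : Int) :
    ∀ (szs : List Int) (items : List (Int × Int)) (done : List (List (Int × Int))),
      (∀ s ∈ szs, 0 < s) →
      ((items.length : Int) = szs.sum) →
      (∀ (i : Nat) (h : i < szs.length),
        szs[i] = ipp + (if (((done.length + i : Nat) : Int)) < rem then 1 else 0)) →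
      items.foldl (splitStep ipp rem) (done ++ List.replicate szs.length [], (done.length : Int), 0)
        = (done ++ chunksI szs items, (done.length : Int) + szs.length, 0) := by
  intro szs
  induction szs with
  | nil =>
    intro items done _ hlen _
    have : items = [] := by
      cases items with
      | nil => rfl
      | cons a l => exfalso; simp at hlen; omega
    subst this
    simp [chunksI]
  | cons s rest ih =>
    intro items done hpos hlen hf
    have hs : 0 < s := hpos s (by simp)
    have hrest0 : 0 ≤ rest.sum := List.sum_nonneg (fun x hx => le_of_lt (hpos x (by simp [hx])))
    have hsum : (items.length : Int) = s + rest.sum := by simpa using hlen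
    have hsle : s.toNat ≤ items.length := by omega
    have htlen : (items.take s.toNat).length = s.toNat := by
      simp [List.length_take]; omega
    have htne : items.take s.toNat ≠ [] := by
      intro h
      rw [h] at htlen
      simp at htlen
      omega
    conv_lhs => rw [← List.take_append_drop s.toNat items]
    rw [List.foldl_append]
    have hrep : List.replicate (s :: rest).length ([] : List (Int × Int))
        = reindexChunk [] :: List.replicate rest.length [] := by
      simp [List.replicate_succ, reindexChunk_nil]
    rw [hrep]
    have hsz0 : (([] : List (Int × Int)).length : Int) + ((items.take s.toNat).length : Int)
        = ipp + (if ((done.length : Int)) < rem then 1 else 0) := by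
      have h0 := hf 0 (by simp)
      simp only [List.getElem_cons_zero, Nat.add_zero] at h0
      rw [htlen]
      by_cases hc : ((done.length : Int)) < rem
      · simp only [if_pos hc, List.length_nil, Nat.cast_zero] at h0 ⊢; omega
      · simp only [if_neg hc, List.length_nil, Nat.cast_zero] at h0 ⊢; omega
    have h1 := fill_one ipp rem (items.take s.toNat) [] done (List.replicate rest.length []) htne hsz0
    simp only [List.length_nil, Nat.cast_zero] at h1 hsz0
    rw [h1]
    have hdone' : done ++ reindexChunk ([] ++ items.take s.toNat) :: List.replicate rest.length []
        = (done ++ [reindexChunk (items.take s.toNat)]) ++ List.replicate rest.length [] := by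
      simp
    rw [hdone']
    have hlen' : (((done ++ [reindexChunk (items.take s.toNat)]).length : Nat) : Int)
        = (done.length : Int) + 1 := by simp
    rw [← hlen']
    rw [ih (items.drop s.toNat) (done ++ [reindexChunk (items.take s.toNat)])
      (fun x hx => hpos x (by simp [hx]))
      (by simp [List.length_drop]; omega)
      (by
        intro i hi
        have := hf (i + 1) (by simp; omega)
        simp only [List.getElem_cons_succ] at this
        rw [this]
        congr 2
        simp
        omega)]
    simp [chunksI]
    ring

theorem sum_sizes (r : Int) (q : Int) (h0 : 0 ≤ r) :
    ∀ n : Nat, ((List.range n).map (fun k : Nat => q + if (k : Int) < r then (1 : Int) else 0)).sum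
      = n * q + min r n := by
  intro n
  induction n with
  | zero => simp; omega
  | succ n ih =>
    rw [List.range_succ, List.map_append, List.sum_append, ih]
    simp only [List.map_cons, List.map_nil, List.sum_cons, List.sum_nil]
    push_cast
    have hm : ((n : Int) + 1) * q = (n : Int) * q + q := by ring
    rw [hm]
    split_ifs with h <;> omega

theorem B_fold (data : List (Int × Int)) :
    ∀ (szs : List Int) (acc : List (List (Int × Int))) (pos : Nat),
      (∀ s ∈ szs, 0 ≤ s) →
      (szs.foldl (chunkStep data) (acc, (pos : Int))).1 = acc ++ chunksI szs (data.drop pos) := by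
  intro szs
  induction szs with
  | nil => intro acc pos _; simp [chunksI]
  | cons s rest ih =>
    intro acc pos hpos
    have hs : 0 ≤ s := hpos s (by simp)
    rw [List.foldl_cons]
    have hslice : PySem.List.slice data (some (pos : Int)) (some ((pos : Int) + s))
        = (data.drop pos).take s.toNat := by
      have e1 : ((pos : Int)).toNat = pos := by omega
      have e2 : ((pos : Int) + s).toNat - pos = s.toNat := by omega
      rw [PySem.List.slice_toNat data (by positivity) (by omega), e1, e2]
    have hstep : chunkStep data (acc, (pos : Int)) s
        = (acc ++ [reindexChunk ((data.drop pos).take s.toNat)], ((pos + s.toNat : Nat) : Int)) := by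
      simp only [chunkStep, hslice]
      congr 1
      omega
    rw [hstep, ih _ _ (fun x hx => hpos x (by simp [hx]))]
    simp [chunksI, List.drop_drop]

theorem helper_eq (data : List (Int × Int)) (n : Int) (h1 : 1 ≤ n)
    (h2 : n ≤ (data.length : Int)) :
    split_dictionary data n = split_into_chunks data n := by
  have hn : 0 < n := h1
  set T : Int := (data.length : Int) with hT
  set q := PySem.Int.floordiv T n with hq
  set r := PySem.Int.mod T n with hr
  have hqr : q * n + r = T := PySem.Int.floordiv_mul_add_mod T n
  have hrem : r = T % n := by rw [hr, PySem.Int.mod_eq_emod_of_pos hn]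
  have hr0 : 0 ≤ r := by rw [hrem]; exact Int.emod_nonneg T (by omega)
  have hrn : r < n := by rw [hrem]; exact Int.emod_lt_of_pos T hn
  have hq1 : 1 ≤ q := by
    rw [hq, PySem.Int.le_floordiv_iff_mul_le hn]; omega
  have hpyr : PySem.List.pyRange 0 n 1 = (List.range n.toNat).map (fun k => ((k : Nat) : Int)) := by
    rw [PySem.List.pyRange_one]
    simp
  set f : Int → Int := fun i => q + (if i < r then 1 else 0) with hfdef
  set szs := (PySem.List.pyRange 0 n 1).map f with hszs
  have hszs' : szs = (List.range n.toNat).map (fun k => f ((k : Nat) : Int)) := by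
    rw [hszs, hpyr, List.map_map]; rfl
  have hszlen : szs.length = n.toNat := by rw [hszs']; simp
  have hpos : ∀ s ∈ szs, 0 < s := by
    intro s hs
    rw [hszs'] at hs
    rcases List.mem_map.1 hs with ⟨k, _, rfl⟩
    simp only [hfdef]
    split_ifs <;> omega
  have hsum : (data.length : Int) = szs.sum := by
    rw [hszs', show (fun k : Nat => f ((k : Nat) : Int)) = fun k : Nat => q + (if ((k : Nat) : Int) < r then (1 : Int) else 0) from rfl]
    rw [sum_sizes r q hr0 n.toNat]
    have : ((n.toNat : Nat) : Int) = n := by omega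
    rw [this]
    have : min r n = r := by omega
    rw [this, mul_comm n q]
    omega
  have hA : split_dictionary data n = chunksI szs data := by
    show (data.foldl (splitStep q r) (List.replicate n.toNat [], 0, 0)).1 = chunksI szs data
    rw [← hszlen]
    have := loop_chunks q r szs data []
      hpos (by rw [← hsum])
      (by
        intro i hi
        rw [List.getElem_of_eq hszs' hi]
        simp [hfdef])
    simp only [List.nil_append, List.length_nil, Nat.cast_zero] at this
    rw [this]
  have hB : split_into_chunks data n = chunksI szs data := by
    show (szs.foldl (chunkStep data) ([], 0)).1 = chunksI szs data
    have := B_fold data szs [] 0 (fun s hs => le_of_lt (hpos s hs))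
    simp only [Nat.cast_zero, List.nil_append, List.drop_zero] at this
    rw [this]
  rw [hA, hB]

theorem outer_eq (key_size : Int) :
    ∀ dict_list : List (List (Int × Int)), Pre_split_dictionary_v2 dict_list key_size →
      split_dictionary_v2 dict_list key_size = split_dictionary_v2_alt dict_list key_size := by
  intro dict_list hpre
  unfold split_dictionary_v2 split_dictionary_v2_alt
  induction dict_list using List.reverseRecOn with
  | nil => rfl
  | append_singleton l d ih =>
    have hprel : Pre_split_dictionary_v2 l key_size := fun x hx => hpre x (by simp [hx])
    rw [List.foldl_append, List.foldl_append, ih hprel]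
    simp only [List.foldl_cons, List.foldl_nil]
    by_cases hbig : (10000 : Int) < (d.length : Int)
    · rcases hpre d (by simp) hbig with ⟨hks, hle⟩
      have h5 : 0 < key_size * 5 := by positivity
      have h1 : 1 ≤ PySem.Int.floordiv (d.length : Int) (key_size * 5) := by
        rw [PySem.Int.le_floordiv_iff_mul_le h5]; omega
      have h2 : PySem.Int.floordiv (d.length : Int) (key_size * 5) ≤ (d.length : Int) := by
        have := (PySem.Int.floordiv_lt_iff_lt_mul (a := (d.length : Int)) (b := key_size * 5)
          (q := (d.length : Int) + 1) h5).2 (by nlinarith)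
        omega
      rw [if_pos hbig, if_pos hbig, helper_eq d _ h1 h2]
    · rw [if_neg hbig, if_neg hbig]

-- ===== VERDICT (by name: the statement is the Claim_ definition above) =====
theorem split_dictionary_v2_spec : Claim_equal_split_dictionary_v2 :=
  fun dict_list key_size _ hpre => outer_eq key_size dict_list hpre
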